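-- pv_equiv track=rewrite | github.com/jikyoung/CodingTest_Prac | 프로그래머스/0/181922. 수열과 구간 쿼리 4/수열과 구간 쿼리 4.py | solution
-- ===== SOURCE A (Python) =====
-- def solution(arr, queries):
--     n = len(arr)
--
--     for s, e, k in queries:
--         # 예외 처리: 범위와 k의 유효성 검사
--         if s < 0 or e >= n or s > e:
--             continue  # 잘못된 범위의 경우 쿼리를 무시
--         if k <= 0:
--             continue  # 잘못된 k 값은 무시
--
--         # 첫 번째 유효한 인덱스 계산
--         start = s + (k - s % k) if s % k != 0 else s
--
--         # start부터 k 간격으로 인덱스 증가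
--         for i in range(start, e + 1, k):
--             arr[i] += 1
--
--     return arr
-- ===== SOURCE B (Python) =====
-- def solution(arr, queries):
--     n = len(arr)
--     out = []
--     for i, x in enumerate(arr):
--         c = 0
--         for s, e, k in queries:
--             if s >= 0 and e < n and s <= i <= e and k > 0 and i % k == 0:
--                 c += 1
--         out.append(x + c)
--     arr[:] = out
--     return arr
-- ===== Notes on version B (the rewrite author's own statement) =====
-- stated objective: alternative
-- what changed: Inverts the traversal: instead of mutating the array query-by-query over a stride-k index range, B iterates index-by-index and, for each position i, counts the queries that hit it (valid query with s <= i <= e and i % k == 0), adding that count once; increments commute so the result is identical.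
import Mathlib
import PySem

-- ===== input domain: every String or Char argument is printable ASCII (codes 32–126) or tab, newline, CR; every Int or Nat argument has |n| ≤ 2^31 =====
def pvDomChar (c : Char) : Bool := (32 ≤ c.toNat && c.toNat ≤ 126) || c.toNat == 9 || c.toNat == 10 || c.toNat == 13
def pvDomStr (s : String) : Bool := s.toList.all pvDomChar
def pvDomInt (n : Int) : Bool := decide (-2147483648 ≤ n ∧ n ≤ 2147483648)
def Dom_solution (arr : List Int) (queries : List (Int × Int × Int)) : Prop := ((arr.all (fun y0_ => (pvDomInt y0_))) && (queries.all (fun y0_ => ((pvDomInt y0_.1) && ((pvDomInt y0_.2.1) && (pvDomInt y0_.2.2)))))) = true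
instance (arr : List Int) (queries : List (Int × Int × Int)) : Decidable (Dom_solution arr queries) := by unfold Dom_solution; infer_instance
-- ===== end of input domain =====

-- B inverts the traversal: per index i it counts the valid queries hitting i (s<=i<=e, i%k==0)
-- and adds the count once, instead of A's per-query stride-k mutation; increments commute.
-- (A mutates arr in place; Source B writes the result back via arr[:] = out, so side effects match.)


-- ===== PORT A =====
-- arr[i] += 1; the guards ensure 0 ≤ i < len(arr), so getD/set at i.toNat is exact here
def pvInc (a : List Int) (i : Int) : List Int := a.set i.toNat (a.getD i.toNat 0 + 1)

def solution (arr : List Int) (queries : List (Int × Int × Int)) : List Int :=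
  let n : Int := arr.length
  queries.foldl (fun a q =>
    let s := q.1; let e := q.2.1; let k := q.2.2
    if s < 0 ∨ e ≥ n ∨ s > e then a
    else if k ≤ 0 then a
    else
      let start := if PySem.Int.mod s k ≠ 0 then s + (k - PySem.Int.mod s k) else s
      (PySem.List.pyRange start (e + 1) k).foldl (fun a i => pvInc a i) a) arr

-- ===== PORT B =====
-- does query q hit index i? (the guard of Source B's inner loop)
def pvHit (n i : Int) (q : Int × Int × Int) : Bool :=
  decide (0 ≤ q.1 ∧ q.2.1 < n ∧ q.1 ≤ i ∧ i ≤ q.2.1 ∧ 0 < q.2.2 ∧ PySem.Int.mod i q.2.2 = 0)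

def solution_alt (arr : List Int) (queries : List (Int × Int × Int)) : List Int :=
  let n : Int := arr.length
  (PySem.List.enumerate arr 0).map
    (fun p => p.2 + ((queries.filter (pvHit n p.1)).length : Int))

-- ===== PRECONDITION & SPEC =====
def Spec_solution (arr : List Int) (queries : List (Int × Int × Int)) (out : List Int) : Prop := out = solution_alt arr queries
instance (arr : List Int) (queries : List (Int × Int × Int)) (out : List Int) : Decidable (Spec_solution arr queries out) := by unfold Spec_solution; infer_instance

-- ===== CLAIM (what is proved, stated in full; the proofs are below) =====
def Claim_equal_solution : Prop := ∀ (arr : List Int) (queries : List (Int × Int × Int)), Dom_solution arr queries → Spec_solution arr queries (solution arr queries)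

-- ===== LEMMAS AND PROOFS =====

lemma pyRange_nil_of_le {a b k : Int} (hk : 0 < k) (h : b ≤ a) :
    PySem.List.pyRange a b k = [] := by
  rw [PySem.List.pyRange_of_pos _ _ hk, if_neg (by omega)]
  simp

lemma pyRange_cons_of_pos {a b k : Int} (hk : 0 < k) (hab : a < b) :
    PySem.List.pyRange a b k = a :: PySem.List.pyRange (a + k) b k := by
  rw [PySem.List.pyRange_of_pos _ _ hk, PySem.List.pyRange_of_pos _ _ hk,
    if_pos hab]
  have hcount : ((b - a + k - 1) / k).toNat
      = (if a + k < b then ((b - (a + k) + k - 1) / k).toNat else 0) + 1 := by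
    have h1 : b - a + k - 1 = (b - a - 1) + 1 * k := by ring
    have h2 : (b - a + k - 1) / k = (b - a - 1) / k + 1 := by
      rw [h1, Int.add_mul_ediv_right _ _ (by omega)]
    split_ifs with h3
    · have h5 : b - (a + k) + k - 1 = b - a - 1 := by ring
      rw [h2, h5]
      have : 0 ≤ (b - a - 1) / k := Int.ediv_nonneg (by omega) (by omega)
      omega
    · have h4 : b - a - 1 < k := by omega
      have : (b - a - 1) / k = 0 := Int.ediv_eq_zero_of_lt (by omega) h4
      rw [h2, this]; decide
  rw [hcount, List.range_succ_eq_map]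
  simp only [List.map_cons, List.map_map, Nat.cast_zero, mul_zero, add_zero]
  congr 1
  apply List.map_congr_left
  intro j _
  simp only [Function.comp_apply, Nat.cast_succ]
  ring

-- A's stride-k range starting at the first multiple of k ≥ s, as a filter of the step-1 range
lemma filter_eq_stepped {k : Int} (hk : 0 < k) :
    ∀ (m : Nat) (s e : Int), 0 ≤ s → (e + 1 - s).toNat ≤ m →
      (PySem.List.pyRange s (e + 1) 1).filter (fun i => PySem.Int.mod i k == 0)
      = PySem.List.pyRange
          (if PySem.Int.mod s k ≠ 0 then s + (k - PySem.Int.mod s k) else s) (e + 1) k := by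
  intro m
  induction m with
  | zero =>
    intro s e hs hm
    have hse : e + 1 ≤ s := by omega
    have hmod := PySem.Int.mod_nonneg s (b := k) hk
    have hmod' := PySem.Int.mod_lt s (b := k) hk
    rw [pyRange_nil_of_le one_pos hse, pyRange_nil_of_le hk (by split_ifs <;> omega)]
    simp
  | succ m ih =>
    intro s e hs hm
    by_cases hse : e + 1 ≤ s
    · have hmod := PySem.Int.mod_nonneg s (b := k) hk
      have hmod' := PySem.Int.mod_lt s (b := k) hk
      rw [pyRange_nil_of_le one_pos hse, pyRange_nil_of_le hk (by split_ifs <;> omega)]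
      simp
    · have hlt : s < e + 1 := by omega
      have hrec := ih (s + 1) e (by omega) (by omega)
      have hmodeq : PySem.Int.mod s k = s % k := PySem.Int.mod_eq_emod_of_pos hk
      have hmodeq1 : PySem.Int.mod (s + 1) k = (s % k + 1) % k := by
        rw [PySem.Int.mod_eq_emod_of_pos hk]
        conv_lhs => rw [← Int.emod_add_mul_ediv s k]
        rw [show s % k + k * (s / k) + 1 = s % k + 1 + k * (s / k) by ring,
          Int.add_mul_emod_self_left]
      have hr0 : 0 ≤ s % k := Int.emod_nonneg s (by omega)
      have hrk : s % k < k := Int.emod_lt_of_pos s hk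
      rw [PySem.List.pyRange_one_cons hlt, List.filter_cons]
      by_cases h0 : s % k = 0
      · have hnext : PySem.Int.mod (s + 1) k = if k = 1 then 0 else 1 := by
          rw [hmodeq1, h0, zero_add]
          split_ifs with hk1
          · simp [hk1]
          · exact Int.emod_eq_of_lt (by omega) (by omega)
        have hstart1 : (if PySem.Int.mod (s + 1) k ≠ 0 then s + 1 + (k - PySem.Int.mod (s + 1) k)
            else s + 1) = s + k := by
          rw [hnext]; split_ifs <;> omega
        rw [hstart1] at hrec
        rw [if_pos (by simp [hmodeq, h0])]
        conv_rhs => rw [if_neg (by simp [hmodeq, h0]), pyRange_cons_of_pos hk hlt]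
        rw [hrec]
      · have hstart1 : (if PySem.Int.mod (s + 1) k ≠ 0 then s + 1 + (k - PySem.Int.mod (s + 1) k)
            else s + 1) = s + (k - s % k) := by
          by_cases hlast : s % k = k - 1
          · have hz : PySem.Int.mod (s + 1) k = 0 := by
              rw [hmodeq1, hlast]
              simp
            rw [hz]; simp; omega
          · have hsucc : PySem.Int.mod (s + 1) k = s % k + 1 := by
              rw [hmodeq1]
              exact Int.emod_eq_of_lt (by omega) (by omega)
            rw [hsucc]
            split_ifs with h2 <;> omega
        rw [hstart1] at hrec
        rw [if_neg (by simp [hmodeq, h0])]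
        conv_rhs => rw [if_pos (by simp [hmodeq, h0])]
        rw [hmodeq, hrec]

lemma pvInc_length (a : List Int) (i : Int) : (pvInc a i).length = a.length := by
  simp [pvInc]

lemma incFold_length : ∀ (L : List Int) (a : List Int),
    (L.foldl pvInc a).length = a.length := by
  intro L
  induction L with
  | nil => intro a; rfl
  | cons i L ih => intro a; simp [List.foldl_cons, ih, pvInc_length]

-- a fold of unit increments adds, at each position, the number of occurrences of that index
lemma incFold_getD : ∀ (L : List Int) (a : List Int) (p : Nat), p < a.length →
    (∀ i ∈ L, 0 ≤ i) →
    (L.foldl pvInc a).getD p 0 = a.getD p 0 + L.count (p : Int) := by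
  intro L
  induction L with
  | nil => intro a p hp _; simp
  | cons i L ih =>
    intro a p hp hnn
    have hi : 0 ≤ i := hnn i (List.mem_cons_self ..)
    have hstep : (pvInc a i).getD p 0
        = a.getD p 0 + (if i = (p : Int) then 1 else 0) := by
      unfold pvInc
      by_cases hip : i.toNat = p
      · have hieq : i = (p : Int) := by omega
        rw [hip, if_pos hieq, List.getD_eq_getElem _ _ (by simpa using hp),
          List.getElem_set_self, List.getD_eq_getElem _ _ hp]
      · have hine : ¬ i = (p : Int) := by omega
        rw [if_neg hine, add_zero]
        by_cases hilen : i.toNat < a.length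
        · rw [List.getD_eq_getElem _ _ (by simpa using hp),
            List.getElem_set_ne hip, List.getD_eq_getElem _ _ hp]
        · rw [List.set_eq_of_length_le (by omega)]
    rw [List.foldl_cons, ih (pvInc a i) p (by rw [pvInc_length]; exact hp)
      (fun j hj => hnn j (List.mem_cons_of_mem _ hj)), hstep, List.count_cons]
    simp only [beq_iff_eq]
    split_ifs with h1 <;> omega

lemma count_pyRange_one (a b j : Int) :
    (PySem.List.pyRange a b 1).count j = if a ≤ j ∧ j < b then 1 else 0 := by
  split_ifs with h
  · exact List.count_eq_one_of_mem (PySem.List.nodup_pyRange_one a b)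
      ((PySem.List.mem_pyRange_one).2 h)
  · exact List.count_eq_zero_of_not_mem
      (fun hm => h ((PySem.List.mem_pyRange_one).1 hm))

-- one query of A adds, at each in-range position p, exactly 1 if the query hits p
lemma stepA_getD (a : List Int) (n : Int) (q : Int × Int × Int) (p : Nat)
    (hp : p < a.length) :
    ((if q.1 < 0 ∨ q.2.1 ≥ n ∨ q.1 > q.2.1 then a
      else if q.2.2 ≤ 0 then a
      else
        (PySem.List.pyRange
          (if PySem.Int.mod q.1 q.2.2 ≠ 0 then q.1 + (q.2.2 - PySem.Int.mod q.1 q.2.2) else q.1)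
          (q.2.1 + 1) q.2.2).foldl (fun a i => pvInc a i) a).getD p 0)
    = a.getD p 0 + (if pvHit n (p : Int) q then 1 else 0) := by
  obtain ⟨s, e, k⟩ := q
  simp only [pvHit]
  by_cases hg : s < 0 ∨ e ≥ (n : Int) ∨ s > e
  · rw [if_pos hg]
    have : ¬ (0 ≤ s ∧ e < n ∧ s ≤ (p : Int) ∧ (p : Int) ≤ e ∧ 0 < k ∧
        PySem.Int.mod (p : Int) k = 0) := by
      rintro ⟨h1, h2, h3, h4, _, _⟩; omega
    simp [this]
  · by_cases hk0 : k ≤ 0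
    · rw [if_neg hg, if_pos hk0]
      have : ¬ (0 ≤ s ∧ e < n ∧ s ≤ (p : Int) ∧ (p : Int) ≤ e ∧ 0 < k ∧
          PySem.Int.mod (p : Int) k = 0) := by
        rintro ⟨_, _, _, _, h5, _⟩; omega
      simp [this]
    · rw [if_neg hg, if_neg hk0]
      have hk : 0 < k := by omega
      have hs0 : 0 ≤ s := by omega
      have hen : e < n := by omega
      have hfil := filter_eq_stepped hk ((e + 1 - s).toNat) s e hs0 le_rfl
      rw [← hfil]
      have hnn : ∀ i ∈ (PySem.List.pyRange s (e + 1) 1).filter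
          (fun i => PySem.Int.mod i k == 0), 0 ≤ i := by
        intro i hi
        have := (PySem.List.mem_pyRange_one).1 (List.mem_of_mem_filter hi)
        omega
      rw [incFold_getD _ a p hp hnn]
      have hcnt : (List.filter (fun i => PySem.Int.mod i k == 0)
            (PySem.List.pyRange s (e + 1) 1)).count ((p : Nat) : Int)
          = if PySem.Int.mod ((p : Nat) : Int) k = 0 ∧ s ≤ ((p : Nat) : Int) ∧
              ((p : Nat) : Int) < e + 1 then 1 else 0 := by
        by_cases hm : PySem.Int.mod ((p : Nat) : Int) k = 0
        · rw [List.count_filter (by simp [hm]), count_pyRange_one]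
          simp [hm]
        · rw [List.count_eq_zero_of_not_mem
            (fun hmem => hm (by simpa using List.of_mem_filter hmem))]
          simp [hm]
      rw [hcnt]
      simp only [decide_eq_true_eq]
      split_ifs with h1 h2 h2
      · rfl
      · exact absurd ⟨hs0, hen, h1.2.1, by omega, hk, h1.1⟩ h2
      · exact absurd ⟨h2.2.2.2.2.2, h2.2.2.1, by omega⟩ h1
      · rfl

lemma foldA_getD (n : Int) : ∀ (qs : List (Int × Int × Int)) (a : List Int) (p : Nat),
    p < a.length →
    ((qs.foldl (fun a q =>
      if q.1 < 0 ∨ q.2.1 ≥ n ∨ q.1 > q.2.1 then a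
      else if q.2.2 ≤ 0 then a
      else
        (PySem.List.pyRange
          (if PySem.Int.mod q.1 q.2.2 ≠ 0 then q.1 + (q.2.2 - PySem.Int.mod q.1 q.2.2) else q.1)
          (q.2.1 + 1) q.2.2).foldl (fun a i => pvInc a i) a) a).getD p 0)
    = a.getD p 0 + ((qs.filter (pvHit n (p : Int))).length : Int) := by
  intro qs
  induction qs with
  | nil => intro a p hp; simp
  | cons q qs ih =>
    intro a p hp
    have hlen : ∀ (b : List Int) (r : Int × Int × Int),
        ((if r.1 < 0 ∨ r.2.1 ≥ n ∨ r.1 > r.2.1 then b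
          else if r.2.2 ≤ 0 then b
          else
            (PySem.List.pyRange
              (if PySem.Int.mod r.1 r.2.2 ≠ 0 then r.1 + (r.2.2 - PySem.Int.mod r.1 r.2.2) else r.1)
              (r.2.1 + 1) r.2.2).foldl (fun a i => pvInc a i) b) : List Int).length
          = b.length := by
      intro b r
      split_ifs; repeat simp [incFold_length]
    rw [List.foldl_cons, ih _ p (by rw [hlen]; exact hp), stepA_getD a n q p hp,
      List.filter_cons]
    split_ifs with h1 <;> simp <;> omega

lemma foldA_length (n : Int) : ∀ (qs : List (Int × Int × Int)) (a : List Int),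
    (qs.foldl (fun a q =>
      if q.1 < 0 ∨ q.2.1 ≥ n ∨ q.1 > q.2.1 then a
      else if q.2.2 ≤ 0 then a
      else
        (PySem.List.pyRange
          (if PySem.Int.mod q.1 q.2.2 ≠ 0 then q.1 + (q.2.2 - PySem.Int.mod q.1 q.2.2) else q.1)
          (q.2.1 + 1) q.2.2).foldl (fun a i => pvInc a i) a) a).length = a.length := by
  intro qs
  induction qs with
  | nil => intro a; rfl
  | cons q qs ih =>
    intro a
    rw [List.foldl_cons, ih]
    split_ifs; repeat simp [incFold_length]

-- ===== VERDICT (by name: the statement is the Claim_ definition above) =====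
theorem solution_spec : Claim_equal_solution := by
  intro arr queries _
  unfold Spec_solution solution solution_alt
  simp only
  apply List.ext_getElem
  · rw [foldA_length]
    simp [PySem.List.length_enumerate]
  · intro p hp1 hp2
    have hp : p < arr.length := by rw [foldA_length] at hp1; exact hp1
    have hL := foldA_getD (arr.length : Int) queries arr p hp
    rw [List.getD_eq_getElem _ _ hp1, List.getD_eq_getElem _ _ hp] at hL
    rw [hL, List.getElem_map, PySem.List.getElem_enumerate]
    simp
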